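-- pv_equiv track=rewrite | github.com/yixiliu617/AlphaGraph_new | backend/scripts/extractors/tsmc_management_report.py | _find_section_lines
-- ===== SOURCE A (Python) =====
-- def _find_section_lines(text: str, anchor: str, end_anchors: tuple[str, ...] = ()) -> list[str] | None:
--     """Slice the text starting at the line containing `anchor`, ending just
--     before the first line containing any of `end_anchors`. Returns None if
--     `anchor` not found."""
--     lines = text.splitlines()
--     start = next((i for i, ln in enumerate(lines) if anchor in ln), None)
--     if start is None:
--         return None
--     end = len(lines)
--     for j in range(start + 1, len(lines)):
--         if any(e in lines[j] for e in end_anchors):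
--             end = j
--             break
--     return lines[start:end]
-- ===== SOURCE B (Python) =====
-- def _find_section_lines(text: str, anchor: str, end_anchors: tuple[str, ...] = ()) -> list[str] | None:
--     """Single linear pass: start collecting at the first line containing
--     `anchor`, stop before the first later line containing any end anchor."""
--     acc = None
--     for ln in text.splitlines():
--         if acc is None:
--             if anchor in ln:
--                 acc = [ln]
--         elif any(e in ln for e in end_anchors):
--             break
--         else:
--             acc.append(ln)
--     return acc
-- ===== Notes on version B (the rewrite author's own statement) =====
-- stated objective: alternative
-- what changed: Replaces the index-based decomposition (find start index, scan for end index, slice) by a single linear pass with a collecting flag and an accumulator list, never materialising indices or slicing.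
import Mathlib
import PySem

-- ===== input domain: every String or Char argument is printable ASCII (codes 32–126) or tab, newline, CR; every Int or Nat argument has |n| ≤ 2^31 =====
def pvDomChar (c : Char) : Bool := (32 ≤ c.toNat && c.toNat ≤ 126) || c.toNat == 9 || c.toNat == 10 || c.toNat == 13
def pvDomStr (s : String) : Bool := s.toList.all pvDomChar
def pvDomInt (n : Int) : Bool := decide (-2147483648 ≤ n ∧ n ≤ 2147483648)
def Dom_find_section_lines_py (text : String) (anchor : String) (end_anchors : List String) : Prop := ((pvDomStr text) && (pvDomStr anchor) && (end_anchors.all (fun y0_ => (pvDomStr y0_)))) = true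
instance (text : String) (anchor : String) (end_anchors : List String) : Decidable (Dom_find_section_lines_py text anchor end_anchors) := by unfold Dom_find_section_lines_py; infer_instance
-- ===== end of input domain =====

-- B replaces A's find-start-index / scan-for-end-index / slice decomposition by one
-- linear pass with a collecting accumulator (objective: alternative, same cost).


-- ===== PORT A =====
-- next((i for i, ln in enumerate(lines) if anchor in ln), None), as structural recursion
def pvFirstIdx (anchor : String) : List String → Option Nat
  | [] => none
  | ln :: ls => if PySem.Str.isIn anchor ln then some 0 else (pvFirstIdx anchor ls).map (· + 1)

-- the 'for j in range(start+1, len(lines))' break scan, run on lines.drop (start+1):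
-- returns the offset of the first line containing an end anchor, else the length of the rest
def pvEndOffset (end_anchors : List String) : List String → Nat
  | [] => 0
  | ln :: ls => if end_anchors.any (fun e => PySem.Str.isIn e ln) then 0 else pvEndOffset end_anchors ls + 1

def find_section_lines_py (text : String) (anchor : String) (end_anchors : List String) : Option (List String) :=
  let lines := PySem.Str.splitlines text
  match pvFirstIdx anchor lines with
  | none => none
  | some start =>
    let e : Nat := start + 1 + pvEndOffset end_anchors (lines.drop (start + 1))
    some (PySem.List.slice lines (some (start : Int)) (some (e : Int)))

-- ===== PORT B =====
-- one pass: acc = none while not collecting, some a once the anchor line was seen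
def pvCollect (anchor : String) (end_anchors : List String) : Option (List String) → List String → Option (List String)
  | acc, [] => acc
  | none, ln :: ls =>
    if PySem.Str.isIn anchor ln then pvCollect anchor end_anchors (some [ln]) ls
    else pvCollect anchor end_anchors none ls
  | some a, ln :: ls =>
    if end_anchors.any (fun e => PySem.Str.isIn e ln) then some a
    else pvCollect anchor end_anchors (some (a ++ [ln])) ls

def find_section_lines_py_alt (text : String) (anchor : String) (end_anchors : List String) : Option (List String) :=
  pvCollect anchor end_anchors none (PySem.Str.splitlines text)

-- ===== PRECONDITION & SPEC =====
def Spec_find_section_lines_py (text : String) (anchor : String) (end_anchors : List String) (out : Option (List String)) : Prop := out = find_section_lines_py_alt text anchor end_anchors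
instance (text : String) (anchor : String) (end_anchors : List String) (out : Option (List String)) : Decidable (Spec_find_section_lines_py text anchor end_anchors out) := by unfold Spec_find_section_lines_py; infer_instance

-- ===== CLAIM (what is proved, stated in full; the proofs are below) =====
def Claim_equal_find_section_lines_py : Prop := ∀ (text : String) (anchor : String) (end_anchors : List String), Dom_find_section_lines_py text anchor end_anchors → Spec_find_section_lines_py text anchor end_anchors (find_section_lines_py text anchor end_anchors)

-- ===== LEMMAS AND PROOFS =====
-- once collecting, B appends lines up to the first end-anchor line: exactly a take of pvEndOffset
theorem pvCollect_some (anchor : String) (end_anchors : List String) :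
    ∀ (ls a : List String),
      pvCollect anchor end_anchors (some a) ls = some (a ++ ls.take (pvEndOffset end_anchors ls)) := by
  intro ls
  induction ls with
  | nil => intro a; simp [pvCollect, pvEndOffset]
  | cons ln rest ih =>
    intro a
    cases h : end_anchors.any (fun e => PySem.Str.isIn e ln) with
    | true => simp only [pvCollect, pvEndOffset, h, reduceIte]; simp
    | false =>
      simp only [pvCollect, pvEndOffset, h]
      rw [ih]; simp

-- the main induction over the line list, with A's result written in drop/take form
theorem pvMain (anchor : String) (end_anchors : List String) :
    ∀ (lines : List String),
      (match pvFirstIdx anchor lines with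
        | none => (none : Option (List String))
        | some start =>
          some ((lines.drop start).take (pvEndOffset end_anchors (lines.drop (start + 1)) + 1))) =
      pvCollect anchor end_anchors none lines := by
  intro lines
  induction lines with
  | nil => simp [pvFirstIdx, pvCollect]
  | cons ln rest ih =>
    cases h : PySem.Str.isIn anchor ln with
    | true =>
      simp only [pvFirstIdx, h, reduceIte, List.drop_zero, List.drop_succ_cons,
        pvCollect, pvCollect_some, List.take_succ_cons]
      simp
    | false =>
      simp only [pvFirstIdx, h, reduceIte, pvCollect]
      rw [← ih]
      cases hf : pvFirstIdx anchor rest with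
      | none => simp [hf]
      | some s => simp [hf, List.drop_succ_cons]

-- ===== VERDICT (by name: the statement is the Claim_ definition above) =====
theorem find_section_lines_py_spec : Claim_equal_find_section_lines_py := by
  intro text anchor end_anchors _
  unfold Spec_find_section_lines_py find_section_lines_py find_section_lines_py_alt
  rw [← pvMain anchor end_anchors (PySem.Str.splitlines text)]
  cases hf : pvFirstIdx anchor (PySem.Str.splitlines text) with
  | none => simp [hf]
  | some s =>
    simp only [hf]
    rw [PySem.List.slice_natCast]
    have h2 : s + 1 + pvEndOffset end_anchors ((PySem.Str.splitlines text).drop (s + 1)) - s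
        = pvEndOffset end_anchors ((PySem.Str.splitlines text).drop (s + 1)) + 1 := by omega
    rw [h2]
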